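-- pv_equiv track=rewrite | github.com/apostlez/algorithm-Exams | 2024q2/1.py | insert_plus_1
-- ===== SOURCE A (Python) =====
-- from itertools import combinations
--
-- def insert_plus_1(s):
--   # gen all expr
--   n = len(s)
--   result = []
--
--   for i in range(n, -1, -1):
--     for comb in combinations(range(1, n), i):
--       expr = list(s)
--       for idx in comb:
--         expr.insert(idx + comb.index(idx), '+')
--       result.append(''.join(expr))
--
--   return result
-- ===== SOURCE B (Python) =====
-- def insert_plus_1(s):
--     # DFS over cut positions: build each expression by slicing s, grouped by
--     # descending number of '+' signs, cuts in lexicographic order.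
--     n = len(s)
--     result = []
--
--     def gen(start, prev, k, prefix):
--         if k == 0:
--             result.append(prefix + s[prev:])
--             return
--         for c in range(start, n - k + 1):
--             gen(c + 1, c, k - 1, prefix + s[prev:c] + '+')
--
--     for k in range(max(n - 1, 0), -1, -1):
--         gen(1, 0, k, '')
--     return result
-- ===== Notes on version B (the rewrite author's own statement) =====
-- stated objective: alternative
-- what changed: Replaces itertools.combinations plus per-cut list.insert/comb.index splicing with a recursive DFS over cut positions that builds each expression directly by slicing the string and sharing common prefixes.
import Mathlib
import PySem

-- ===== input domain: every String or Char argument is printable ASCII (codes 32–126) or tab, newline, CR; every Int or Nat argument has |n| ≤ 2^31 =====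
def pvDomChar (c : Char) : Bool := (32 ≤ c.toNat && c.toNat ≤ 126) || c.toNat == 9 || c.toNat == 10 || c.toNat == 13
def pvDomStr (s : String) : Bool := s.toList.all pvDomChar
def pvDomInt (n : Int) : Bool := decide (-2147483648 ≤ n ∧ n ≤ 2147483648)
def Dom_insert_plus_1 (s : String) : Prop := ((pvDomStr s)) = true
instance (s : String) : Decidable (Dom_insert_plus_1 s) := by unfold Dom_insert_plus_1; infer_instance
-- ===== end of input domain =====

-- B replaces A's combinations + list.insert/comb.index splicing by a recursive DFS
-- over cut positions that builds each expression directly by slicing the string;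
-- return values agree on all inputs.

-- ===== PORT A =====
-- Literal port of A. itertools.combinations is PySem.List.combinations (CPython order);
-- comb.index(idx) is PySem.List.index? — idx always occurs in comb, so '.getD 0' never
-- supplies the default; ''.join over the char list is String.ofList.
def insert_plus_1 (s : String) : List String :=
  let n : Int := (s.toList.length : Int)
  (PySem.List.pyRange n (-1) (-1)).foldl (fun result i =>
    (PySem.List.combinations (PySem.List.pyRange 1 n 1) i.toNat).foldl (fun result comb =>
      let expr := comb.foldl (fun expr idx =>
        PySem.List.insert expr (idx + ((PySem.List.index? comb idx).getD 0 : Int)) '+') s.toList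
      result ++ [String.ofList expr]) result) []

-- ===== PORT B =====
-- Port of B's recursive gen (Python strings built by concatenation/slicing are carried
-- as char lists, turned into String by String.ofList exactly where Python appends to result).
def insert_plus_1_gen (s : List Char) (n : Int) :
    Nat → Int → Int → List Char → List String → List String
  | 0, _start, prev, pre, result =>
      result ++ [String.ofList (pre ++ PySem.List.slice s (some prev) none)]
  | Nat.succ k, start, prev, pre, result =>
      (PySem.List.pyRange start (n - ((k : Int) + 1) + 1) 1).foldl
        (fun result c =>
          insert_plus_1_gen s n k (c + 1) c
            (pre ++ PySem.List.slice s (some prev) (some c) ++ ['+']) result)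
        result

def insert_plus_1_alt (s : String) : List String :=
  let n : Int := (s.toList.length : Int)
  (PySem.List.pyRange (max (n - 1) 0) (-1) (-1)).foldl
    (fun result k => insert_plus_1_gen s.toList n k.toNat 1 0 [] result) []

-- ===== PRECONDITION & SPEC =====
def Spec_insert_plus_1 (s : String) (out : List String) : Prop := out = insert_plus_1_alt s
instance (s : String) (out : List String) : Decidable (Spec_insert_plus_1 s out) := by unfold Spec_insert_plus_1; infer_instance

-- ===== CLAIM (what is proved, stated in full; the proofs are below) =====
def Claim_equal_insert_plus_1 : Prop := ∀ (s : String), Dom_insert_plus_1 s → Spec_insert_plus_1 s (insert_plus_1 s)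

-- ===== LEMMAS AND PROOFS =====

-- The characters of the expression with cut positions `cuts` (strictly increasing),
-- everything at or after position `prev` still to be emitted.
def woven (cs : List Char) (prev : Int) : List Int → List Char
  | [] => PySem.List.slice cs (some prev) none
  | c :: rest => PySem.List.slice cs (some prev) (some c) ++ '+' :: woven cs c rest

lemma insert_in_range (xs : List Char) (v : Char) (i : Int) (h0 : 0 ≤ i)
    (h : i ≤ (xs.length : Int)) :
    PySem.List.insert xs i v = xs.take i.toNat ++ v :: xs.drop i.toNat := by
  have : (if i < 0 then max (i + ↑xs.length) 0 else min i ↑xs.length) = i := by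
    rw [if_neg (by omega)]; omega
  simp [PySem.List.insert, PySem.List.sliceIndices, this]

-- A's insertion loop over a strictly increasing combination produces exactly the
-- sliced-and-joined expression `woven`.
lemma Ains (cs : List Char) (comb : List Int)
    (hpw : comb.Pairwise (· < ·))
    (hmem : ∀ c ∈ comb, 1 ≤ c ∧ c < (cs.length : Int)) :
    ∀ (rest : List Int) (pre : List Int) (done : List Char) (prev : Int),
      pre ++ rest = comb →
      (∀ c ∈ rest, prev ≤ c) →
      0 ≤ prev → prev ≤ (cs.length : Int) →
      done.length = prev.toNat + pre.length →
      rest.foldl (fun expr idx =>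
          PySem.List.insert expr (idx + ((PySem.List.index? comb idx).getD 0 : Int)) '+')
        (done ++ cs.drop prev.toNat)
        = done ++ woven cs prev rest := by
  intro rest
  induction rest with
  | nil =>
      intro pre done prev _ _ h0 _ _
      simp [woven, PySem.List.slice_from cs h0]
  | cons c rest' ih =>
      intro pre done prev hsplit hge h0 hle hlen
      have hc : c ∈ comb := by rw [← hsplit]; simp
      obtain ⟨hc1, hc2⟩ := hmem c hc
      have hpw' : (pre ++ c :: rest').Pairwise (· < ·) := by rw [hsplit]; exact hpw
      rw [List.pairwise_append] at hpw'
      have hnotpre : c ∉ pre := fun hcp => by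
        have := hpw'.2.2 c hcp c (by simp)
        omega
      have hidx : PySem.List.index? comb c = some pre.length := by
        rw [PySem.List.index?_eq_some_iff]
        exact ⟨pre, rest', hsplit.symm, rfl, hnotpre⟩
      have hprevc : prev ≤ c := hge c (by simp)
      rw [List.foldl_cons]
      simp only [hidx, Option.getD_some]
      have hlen' : (done ++ cs.drop prev.toNat).length = pre.length + cs.length := by
        simp [hlen]; omega
      rw [insert_in_range _ _ _ (by omega) (by rw [hlen']; push_cast; omega)]
      have htn : (c + (pre.length : Int)).toNat = done.length + (c.toNat - prev.toNat) := by
        omega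
      rw [htn, List.take_append, List.drop_append]
      have e1 : List.take (done.length + (c.toNat - prev.toNat)) done = done :=
        List.take_of_length_le (by omega)
      have e2 : done.length + (c.toNat - prev.toNat) - done.length = c.toNat - prev.toNat := by
        omega
      have e3 : List.drop (done.length + (c.toNat - prev.toNat)) done = [] := by
        apply List.drop_eq_nil_of_le; omega
      rw [e1, e2, e3, List.nil_append]
      have h2 : List.take (c.toNat - prev.toNat) (List.drop prev.toNat cs)
          = PySem.List.slice cs (some prev) (some c) := by
        rw [PySem.List.slice_toNat cs h0 (by omega)]
      have h3 : List.drop (c.toNat - prev.toNat) (List.drop prev.toNat cs)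
          = List.drop c.toNat cs := by
        rw [List.drop_drop]
        congr 1
        omega
      rw [h2, h3]
      have hsl : (PySem.List.slice cs (some prev) (some c)).length
          = c.toNat - prev.toNat := by
        rw [PySem.List.slice_toNat cs h0 (by omega)]
        simp
        omega
      have := ih (pre ++ [c]) (done ++ PySem.List.slice cs (some prev) (some c) ++ ['+']) c
        (by rw [← hsplit]; simp)
        (fun x hx => le_of_lt ((List.pairwise_cons.mp hpw'.2.1).1 x hx))
        (by omega) (by omega)
        (by simp [hsl, hlen]; omega)
      simp only [List.append_assoc, List.cons_append, List.nil_append] at this ⊢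
      rw [this]
      simp [woven]

lemma foldA_eq (cs : List Char) (r : Nat) (comb : List Int)
    (hc : comb ∈ PySem.List.combinations (PySem.List.pyRange 1 (cs.length : Int) 1) r) :
    comb.foldl (fun expr idx =>
        PySem.List.insert expr (idx + ((PySem.List.index? comb idx).getD 0 : Int)) '+') cs
      = woven cs 0 comb := by
  have hsub := ((PySem.List.mem_combinations_iff _ _ _).1 hc).1
  have hpw : comb.Pairwise (· < ·) :=
    (PySem.List.pairwise_lt_pyRange_one 1 (cs.length : Int)).sublist hsub
  have hmem : ∀ c ∈ comb, 1 ≤ c ∧ c < (cs.length : Int) := fun c hm =>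
    PySem.List.mem_pyRange_one.1 (hsub.mem hm)
  have := Ains cs comb hpw hmem comb [] [] 0 rfl
    (fun c hm => le_trans (by norm_num) (hmem c hm).1) le_rfl (by positivity) rfl
  simpa using this

-- combinations over a tail range, unrolled on the first chosen element.
lemma combK (n : Int) : ∀ (m k : Nat) (start : Int), (n - k - start).toNat ≤ m →
    PySem.List.combinations (PySem.List.pyRange start n 1) (k + 1)
      = (PySem.List.pyRange start (n - k) 1).flatMap
          (fun c => (PySem.List.combinations (PySem.List.pyRange (c + 1) n 1) k).map
            (fun comb => c :: comb)) := by
  intro m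
  induction m with
  | zero =>
      intro k start hm
      have h1 : PySem.List.pyRange start (n - k) 1 = [] :=
        PySem.List.pyRange_one_eq_nil (by omega)
      have h2 : (PySem.List.pyRange start n 1).length < k + 1 := by
        rw [PySem.List.length_pyRange_one]; omega
      rw [h1, PySem.List.combinations_eq_nil_of_length_lt _ h2]
      rfl
  | succ m ih =>
      intro k start hm
      by_cases h : start < n - k
      · rw [PySem.List.pyRange_one_cons (show start < n by omega),
            PySem.List.combinations_cons_succ,
            PySem.List.pyRange_one_cons h, List.flatMap_cons,
            ih k (start + 1) (by omega)]
      · have h1 : PySem.List.pyRange start (n - k) 1 = [] :=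
          PySem.List.pyRange_one_eq_nil (by omega)
        have h2 : (PySem.List.pyRange start n 1).length < k + 1 := by
          rw [PySem.List.length_pyRange_one]; omega
        rw [h1, PySem.List.combinations_eq_nil_of_length_lt _ h2]
        rfl

-- B's DFS emits exactly the expressions of the combinations of the remaining range,
-- in combinations (CPython) order.
lemma genB_eq (cs : List Char) :
    ∀ (k : Nat) (start prev : Int) (pre : List Char) (res : List String),
      insert_plus_1_gen cs (cs.length : Int) k start prev pre res
        = res ++ (PySem.List.combinations (PySem.List.pyRange start (cs.length : Int) 1) k).map
            (fun comb => String.ofList (pre ++ woven cs prev comb))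
  | 0, start, prev, pre, res => by
      simp [insert_plus_1_gen, PySem.List.combinations_zero, woven]
  | k + 1, start, prev, pre, res => by
      rw [insert_plus_1_gen]
      rw [PySem.List.foldl_congr_mem _ _
        (fun res c => res ++
          ((PySem.List.combinations (PySem.List.pyRange (c + 1) (cs.length : Int) 1) k).map
            (fun comb => String.ofList (pre ++ woven cs prev (c :: comb))))) _
        (by
          intro acc c _
          rw [genB_eq cs k (c + 1) c (pre ++ PySem.List.slice cs (some prev) (some c) ++ ['+']) acc]
          congr 1
          apply List.map_congr_left
          intro comb _
          simp [woven, List.append_assoc])]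
      rw [PySem.List.foldl_append_eq_flatMap]
      have hb : (cs.length : Int) - ((k : Int) + 1) + 1 = (cs.length : Int) - k := by omega
      rw [hb, combK (cs.length : Int) ((cs.length : Int) - k - start).toNat k start le_rfl]
      rw [List.map_flatMap]
      simp [List.map_map, Function.comp_def]

-- ===== VERDICT (by name: the statement is the Claim_ definition above) =====
theorem insert_plus_1_spec : Claim_equal_insert_plus_1 := by
  intro s _
  show insert_plus_1 s = insert_plus_1_alt s
  simp only [insert_plus_1, insert_plus_1_alt]
  rw [PySem.List.foldl_congr_mem _ _
    (fun res (i : Int) => res ++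
      ((PySem.List.combinations (PySem.List.pyRange 1 (s.toList.length : Int) 1) i.toNat).map
        (fun comb => String.ofList (woven s.toList 0 comb)))) _
    (by
      intro acc i _
      rw [PySem.List.foldl_append_singleton_eq_map]
      simp only []
      congr 1
      apply List.map_congr_left
      intro comb hcm
      congr 1
      exact foldA_eq s.toList i.toNat comb hcm),
    PySem.List.foldl_append_eq_flatMap]
  rw [PySem.List.foldl_congr_mem _ _
    (fun res (k : Int) => res ++
      ((PySem.List.combinations (PySem.List.pyRange 1 (s.toList.length : Int) 1) k.toNat).map
        (fun comb => String.ofList (woven s.toList 0 comb)))) _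
    (by
      intro acc k _
      rw [genB_eq s.toList k.toNat 1 0 [] acc]
      simp),
    PySem.List.foldl_append_eq_flatMap]
  simp only [List.nil_append]
  by_cases h0 : s.toList.length = 0
  · simp [h0]
  · have hmax : max ((s.toList.length : Int) - 1) 0 = (s.toList.length : Int) - 1 := by omega
    rw [hmax, PySem.List.pyRange_neg_one_cons (show (-1 : Int) < (s.toList.length : Int) by omega),
      List.flatMap_cons,
      PySem.List.combinations_eq_nil_of_length_lt _
        (by rw [PySem.List.length_pyRange_one]; omega)]
    simp
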